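-- pv_equiv track=rewrite | github.com/KuangWenQing/pyProject | ubxTranslate/GPS_PFA.py | dict_to_keep_time
-- ===== SOURCE A (Python) =====
-- def dict_to_keep_time(d_: dict):
--     ddd = {}
--     for key in d_.keys():
--         flag = 0
--         ddd[key] = []
--         for i in d_[key]:
--             if i == 1:
--                 if flag == 1:
--                     ddd[key][-1] += 1
--                 else:
--                     ddd[key].append(1)
--                 flag = 1
--             elif i == 0:
--                 flag = 0
--             else:
--                 raise Exception
--     return ddd
-- ===== SOURCE B (Python) =====
-- def dict_to_keep_time(d_: dict):
--     out = {}
--     for key, vals in d_.items():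
--         runs = []
--         i, n = 0, len(vals)
--         while i < n:
--             v = vals[i]
--             j = i
--             while j < n and vals[j] == v:
--                 j += 1
--             if v == 1:
--                 runs.append(j - i)
--             elif v != 0:
--                 raise Exception
--             i = j
--         out[key] = runs
--     return out
-- ===== Notes on version B (the rewrite author's own statement) =====
-- stated objective: alternative
-- what changed: Replaces the per-element flag state machine (with in-place increment of the last run length) with a two-pointer run scanner: each maximal run of equal values is measured in one inner scan and its length appended once when the value is 1.
import Mathlib
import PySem

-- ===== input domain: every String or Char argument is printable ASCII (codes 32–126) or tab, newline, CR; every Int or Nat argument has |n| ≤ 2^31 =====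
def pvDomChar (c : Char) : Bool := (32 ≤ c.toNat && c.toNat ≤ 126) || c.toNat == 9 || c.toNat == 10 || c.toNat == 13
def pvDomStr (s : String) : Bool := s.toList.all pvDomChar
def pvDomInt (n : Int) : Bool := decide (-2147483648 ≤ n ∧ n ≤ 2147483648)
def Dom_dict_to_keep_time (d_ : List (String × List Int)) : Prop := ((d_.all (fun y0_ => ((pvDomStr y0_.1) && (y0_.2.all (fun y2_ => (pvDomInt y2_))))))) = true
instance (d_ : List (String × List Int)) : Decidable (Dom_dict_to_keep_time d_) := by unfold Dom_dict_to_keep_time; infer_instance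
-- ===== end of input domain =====

-- B replaces A's per-element flag state machine by a two-pointer maximal-run scanner (same O(n) cost, different decomposition).


-- ===== PORT A =====
-- ddd[key][-1] += 1 : increment the last element (flag = 1 guarantees the list is nonempty)
def pvIncLast : List Int → List Int
  | [] => []
  | x :: xs => if xs.isEmpty then [x + 1] else x :: pvIncLast xs

-- the inner 'for i in d_[key]' loop, state = (mutated list ddd[key], flag);
-- on a value other than 0/1 Python raises (excluded by Pre_), the port stops the loop there
def pvLoopA : List Int → List Int → Int → List Int
  | [], acc, _ => acc
  | i :: rest, acc, flag =>
    if i == 1 then pvLoopA rest (if flag == 1 then pvIncLast acc else acc ++ [(1 : Int)]) 1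
    else if i == 0 then pvLoopA rest acc 0
    else acc

def dict_to_keep_time (d_ : List (String × List Int)) : List (String × List Int) :=
  let d := PySem.Dict.ofList d_
  (d.keys.foldl (fun ddd key => ddd.insert key (pvLoopA (d.getD key []) [] 0)) PySem.Dict.empty).items

-- ===== PORT B =====
-- the two-pointer run scan: the inner 'while vals[j] == v' loop is the takeWhile/dropWhile split
def pvRunsB : List Int → List Int
  | [] => []
  | v :: rest =>
    if v == 1 then ((1 : Int) + (rest.takeWhile (fun x => x == v)).length) :: pvRunsB (rest.dropWhile (fun x => x == v))
    else pvRunsB (rest.dropWhile (fun x => x == v))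
  termination_by l => l.length
  decreasing_by
    · exact Nat.lt_succ_of_le (rest.length_dropWhile_le _)
    · exact Nat.lt_succ_of_le (rest.length_dropWhile_le _)

def dict_to_keep_time_alt (d_ : List (String × List Int)) : List (String × List Int) :=
  ((PySem.Dict.ofList d_).items.foldl
    (fun out kv => out.insert kv.1 (pvRunsB kv.2)) PySem.Dict.empty).items

-- ===== PRECONDITION & SPEC =====
-- Pre_ excludes exactly the inputs on which A raises Exception: a value of the dict
-- (after Python's dict duplicate-key collapse) other than 0 or 1.
def Pre_dict_to_keep_time (d_ : List (String × List Int)) : Prop :=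
  ∀ p ∈ (PySem.Dict.ofList d_).items, ∀ v ∈ p.2, v = 0 ∨ v = 1
instance (d_ : List (String × List Int)) : Decidable (Pre_dict_to_keep_time d_) := by
  unfold Pre_dict_to_keep_time; infer_instance

def pvWitness_dict_to_keep_time : (List (String × List Int)) :=
  [("a", [1, 1, 0, 1]), ("b", [0, 0]), ("c", [])]

def Spec_dict_to_keep_time (d_ : List (String × List Int)) (out : List (String × List Int)) : Prop := out = dict_to_keep_time_alt d_
instance (d_ : List (String × List Int)) (out : List (String × List Int)) : Decidable (Spec_dict_to_keep_time d_ out) := by unfold Spec_dict_to_keep_time; infer_instance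

-- ===== CLAIM (what is proved, stated in full; the proofs are below) =====
def Claim_equal_dict_to_keep_time : Prop := ∀ (d_ : List (String × List Int)), Dom_dict_to_keep_time d_ → Pre_dict_to_keep_time d_ → Spec_dict_to_keep_time d_ (dict_to_keep_time d_)

-- ===== LEMMAS AND PROOFS =====

-- what pvLoopA does from flag = 1 with last run length m so far
def pvH : Int → List Int → List Int
  | m, [] => [m]
  | m, x :: xs => if x == 1 then pvH (m + 1) xs else m :: pvRunsB xs

theorem pvIncLast_append (acc : List Int) (m : Int) :
    pvIncLast (acc ++ [m]) = acc ++ [m + 1] := by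
  induction acc with
  | nil => simp [pvIncLast]
  | cons a acc ih => simp [pvIncLast, ih]

theorem pvRunsB_zero_cons (zs : List Int) :
    pvRunsB (0 :: zs) = pvRunsB (zs.dropWhile (fun x => x == 0)) := by
  rw [pvRunsB.eq_def]
  simp

theorem pvRunsB_dropZeros (ys : List Int) :
    pvRunsB (ys.dropWhile (fun x => x == 0)) = pvRunsB ys := by
  cases ys with
  | nil => rfl
  | cons y zs =>
    by_cases h : y = 0
    · subst h
      rw [List.dropWhile_cons, pvRunsB_zero_cons]
      simp
    · rw [List.dropWhile_cons]
      simp [h]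

theorem pvH_spec (xs : List Int) (h : ∀ v ∈ xs, v = 0 ∨ v = 1) (m : Int) :
    pvH m xs = (m + ((xs.takeWhile (fun x => x == 1)).length : Int))
                :: pvRunsB (xs.dropWhile (fun x => x == 1)) := by
  induction xs generalizing m with
  | nil => simp [pvH, pvRunsB]
  | cons x ys ih =>
    rcases h x (by simp) with h0 | h1
    · subst h0
      simp only [pvH, List.takeWhile_cons, List.dropWhile_cons]
      norm_num
      rw [pvRunsB_zero_cons, pvRunsB_dropZeros]
    · subst h1
      simp only [pvH, List.takeWhile_cons, List.dropWhile_cons]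
      norm_num
      rw [ih (fun v hv => h v (by simp [hv])) (m + 1)]
      ring_nf

theorem pvRunsB_one_cons (ys : List Int) (h : ∀ v ∈ ys, v = 0 ∨ v = 1) :
    pvRunsB (1 :: ys) = pvH 1 ys := by
  rw [pvRunsB.eq_def, pvH_spec ys h 1]
  simp

theorem pvLoopA_spec (xs : List Int) (h : ∀ v ∈ xs, v = 0 ∨ v = 1) :
    (∀ acc, pvLoopA xs acc 0 = acc ++ pvRunsB xs) ∧
    (∀ acc m, pvLoopA xs (acc ++ [m]) 1 = acc ++ pvH m xs) := by
  induction xs with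
  | nil => simp [pvLoopA, pvRunsB, pvH]
  | cons x ys ih =>
    have hys : ∀ v ∈ ys, v = 0 ∨ v = 1 := fun v hv => h v (by simp [hv])
    obtain ⟨ih0, ih1⟩ := ih hys
    rcases h x (by simp) with h0 | h1
    · subst h0
      constructor
      · intro acc
        simp only [pvLoopA]
        norm_num
        rw [ih0 acc]
        rw [pvRunsB_zero_cons, pvRunsB_dropZeros]
      · intro acc m
        simp only [pvLoopA]
        norm_num
        rw [ih0 (acc ++ [m]), pvH]
        simp
    · subst h1
      constructor
      · intro acc
        simp only [pvLoopA]
        norm_num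
        rw [ih1 acc 1, pvRunsB_one_cons ys hys]
      · intro acc m
        simp only [pvLoopA]
        norm_num
        rw [pvIncLast_append, ih1 acc (m + 1), pvH]
        simp

theorem pvLoopA_eq_pvRunsB (xs : List Int) (h : ∀ v ∈ xs, v = 0 ∨ v = 1) :
    pvLoopA xs [] 0 = pvRunsB xs := by
  simpa using (pvLoopA_spec xs h).1 []

-- ===== VERDICT (by name: the statement is the Claim_ definition above) =====
theorem dict_to_keep_time_spec : Claim_equal_dict_to_keep_time := by
  intro d_ _ hpre
  unfold Spec_dict_to_keep_time dict_to_keep_time dict_to_keep_time_alt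
  set d := PySem.Dict.ofList d_ with hd
  have hnd : d.keys.Nodup := PySem.Dict.nodup_keys_ofList d_
  have hA : (d.keys.foldl (fun ddd key => ddd.insert key (pvLoopA (d.getD key []) [] 0))
      PySem.Dict.empty).items
      = d.keys.map (fun k => (k, pvLoopA (d.getD k []) [] 0)) := by
    have := PySem.Dict.items_foldl_insert_fresh (l := d.keys) (k := fun k => k)
      (v := fun k => pvLoopA (d.getD k []) [] 0) (d := PySem.Dict.empty)
      (by intro a _; exact PySem.Dict.contains_empty a) (by simpa using hnd)
    simpa using this
  have hB : (d.items.foldl (fun out kv => out.insert kv.1 (pvRunsB kv.2))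
      PySem.Dict.empty).items
      = d.items.map (fun kv => (kv.1, pvRunsB kv.2)) := by
    have := PySem.Dict.items_foldl_insert_fresh (l := d.items) (k := fun kv => kv.1)
      (v := fun kv => pvRunsB kv.2) (d := PySem.Dict.empty)
      (by intro a _; exact PySem.Dict.contains_empty a.1) (by simpa using hnd)
    simpa using this
  rw [hA, hB]
  have hkeys : d.keys = d.items.map (fun p => p.1) := rfl
  rw [hkeys, List.map_map]
  apply List.map_congr_left
  intro kv hkv
  have hget : d.getD kv.1 [] = kv.2 :=
    PySem.Dict.getD_of_mem_items d (by simpa using hkv) hnd []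
  simp only [Function.comp]
  rw [hget, pvLoopA_eq_pvRunsB kv.2 (hpre kv hkv)]
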